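-- pv_equiv track=rewrite | github.com/Leapense/problems | 13933번: Free Weights/solution.py | is_row_ok
-- ===== SOURCE A (Python) =====
-- from typing import List
--
-- def is_row_ok(row: List[int], limit: int) -> bool:
--     heavy_stack: List[int] = []
--     for weight in row:
--         if weight > limit:
--             heavy_stack.append(weight)
--
--     if len(heavy_stack) & 1:
--         return False
--
--     i: int = 0
--     size: int = len(heavy_stack)
--     while i < size:
--         if heavy_stack[i] != heavy_stack[i + 1]:
--             return False
--         i += 2
--
--     return True
-- ===== SOURCE B (Python) =====
-- from typing import List, Optional
--
-- def is_row_ok(row: List[int], limit: int) -> bool: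
--     pending: Optional[int] = None
--     for weight in row:
--         if weight > limit:
--             if pending is None:
--                 pending = weight
--             elif pending == weight:
--                 pending = None
--             else:
--                 return False
--     return pending is None
-- ===== Notes on version B (the rewrite author's own statement) =====
-- stated objective: simpler
-- what changed: Replaces A's build-a-heavy-list pass plus parity check plus strided index loop with one fused pass holding a single optional 'pending' weight, returning False at the first mismatched pair.
import Mathlib
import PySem

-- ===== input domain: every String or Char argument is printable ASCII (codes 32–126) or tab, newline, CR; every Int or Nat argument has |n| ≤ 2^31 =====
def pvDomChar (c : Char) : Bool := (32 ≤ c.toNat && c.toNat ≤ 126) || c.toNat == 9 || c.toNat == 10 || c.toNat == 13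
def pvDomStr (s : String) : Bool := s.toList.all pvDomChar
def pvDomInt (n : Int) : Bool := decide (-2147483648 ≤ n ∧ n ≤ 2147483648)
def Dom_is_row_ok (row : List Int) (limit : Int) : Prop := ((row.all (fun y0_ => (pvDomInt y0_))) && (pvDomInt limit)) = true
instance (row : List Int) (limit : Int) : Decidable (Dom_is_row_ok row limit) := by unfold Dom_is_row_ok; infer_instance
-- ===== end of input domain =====

-- B fuses A's filter pass, parity check and strided pair loop into one pass with a single
-- optional 'pending' state (objective: simpler).


-- ===== PORT A =====
-- the while loop 'i := 0; while i < size: compare heavy[i] with heavy[i+1]; i += 2'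
-- rendered as structural recursion two elements at a time; the singleton case is
-- unreachable in A (parity already returned False) and returns true here.
def pairLoop : List Int → Bool
  | [] => true
  | [_] => true
  | a :: b :: rest => if a ≠ b then false else pairLoop rest

def is_row_ok (row : List Int) (limit : Int) : Bool :=
  let heavy_stack := row.foldl (fun acc weight => if weight > limit then acc ++ [weight] else acc) []
  if heavy_stack.length &&& 1 ≠ 0 then false
  else pairLoop heavy_stack

-- ===== PORT B =====
def altLoop (limit : Int) : List Int → Option Int → Bool
  | [], pending => pending.isNone
  | weight :: rest, pending =>
    if weight > limit then
      match pending with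
      | none => altLoop limit rest (some weight)
      | some p => if p == weight then altLoop limit rest none else false
    else altLoop limit rest pending

def is_row_ok_alt (row : List Int) (limit : Int) : Bool :=
  altLoop limit row none

-- ===== PRECONDITION & SPEC =====
def Spec_is_row_ok (row : List Int) (limit : Int) (out : Bool) : Prop := out = is_row_ok_alt row limit
instance (row : List Int) (limit : Int) (out : Bool) : Decidable (Spec_is_row_ok row limit out) := by unfold Spec_is_row_ok; infer_instance

-- ===== CLAIM (what is proved, stated in full; the proofs are below) =====
def Claim_equal_is_row_ok : Prop := ∀ (row : List Int) (limit : Int), Dom_is_row_ok row limit → Spec_is_row_ok row limit (is_row_ok row limit)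

-- ===== LEMMAS AND PROOFS =====

-- reference pairing automaton over the heavy list only
def pairState : Option Int → List Int → Bool
  | none, [] => true
  | some _, [] => false
  | none, w :: r => pairState (some w) r
  | some p, w :: r => if p = w then pairState none r else false

theorem foldl_filter (limit : Int) (l : List Int) (acc : List Int) :
    l.foldl (fun acc weight => if weight > limit then acc ++ [weight] else acc) acc
      = acc ++ l.filter (fun w => w > limit) := by
  induction l generalizing acc with
  | nil => simp
  | cons w r ih =>
      simp only [List.foldl_cons, List.filter_cons]
      by_cases h : w > limit
      · simp [h, ih]
      · simp [h, ih]

theorem altLoop_eq_pairState (limit : Int) (l : List Int) (pending : Option Int) :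
    altLoop limit l pending = pairState pending (l.filter (fun w => w > limit)) := by
  induction l generalizing pending with
  | nil => cases pending <;> simp [altLoop, pairState]
  | cons w r ih =>
      simp only [altLoop, List.filter_cons]
      by_cases h : w > limit
      · simp only [h, if_pos, decide_true]
        cases pending with
        | none => simp [pairState, ih]
        | some p =>
            by_cases hp : p = w
            · subst hp
              simp [pairState, ih]
            · simp [pairState, hp]
      · simp [h, ih]

theorem a_core_eq_pairState (h : List Int) :
    (if h.length &&& 1 ≠ 0 then false else pairLoop h) = pairState none h := by
  induction h using pairLoop.induct with
  | case1 => simp [pairLoop, pairState]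
  | case2 a => simp [pairState]
  | case3 a b rest hab =>
      simp [pairLoop, pairState, hab]
  | case4 a b rest hab ih =>
      have hab' : a = b := by simpa using hab
      subst hab'
      simp only [Nat.and_one_is_mod] at ih ⊢
      simpa [pairLoop, pairState, Nat.add_mod_right,
        show rest.length + 1 + 1 = rest.length + 2 from rfl] using ih

-- ===== VERDICT (by name: the statement is the Claim_ definition above) =====
theorem is_row_ok_spec : Claim_equal_is_row_ok := by
  intro row limit _
  unfold Spec_is_row_ok is_row_ok is_row_ok_alt
  rw [altLoop_eq_pairState, foldl_filter]
  simpa using a_core_eq_pairState (row.filter (fun w => w > limit))
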